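-- pv_equiv track=rewrite | github.com/Mushr00ms/fvg-intelligence | logic/utils/btc_fvg_analyzer.py | _build_time_periods
-- ===== SOURCE A (Python) =====
-- def _build_time_periods(interval_minutes: int) -> list:
--     """Generate 24h time period labels at the given interval.
--
--     Returns list of (start_str, end_str, start_minutes, end_minutes).
--     E.g. for 60min: [("00:00", "01:00", 0, 60), ("01:00", "02:00", 60, 120), ...]
--     """
--     periods = []
--     for m in range(0, 1440, interval_minutes):
--         end_m = m + interval_minutes
--         if end_m > 1440:
--             end_m = 1440
--         start_str = f"{m // 60:02d}:{m % 60:02d}"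
--         end_str = f"{end_m // 60:02d}:{end_m % 60:02d}"
--         periods.append((start_str, end_str, m, end_m))
--     return periods
-- ===== SOURCE B (Python) =====
-- def _build_time_periods(interval_minutes: int) -> list:
--     """Backward variant: walk 24h from the END (1440) down to 0, snapping each
--     period start to the previous multiple of the interval with floor division,
--     then reverse. Empty for non-positive intervals (empty day partition)."""
--     if interval_minutes <= 0:
--         return []
--
--     def fmt(t):
--         return f"{t // 60:02d}:{t % 60:02d}"
--
--     periods = []
--     e = 1440
--     while e > 0:
--         s = ((e - 1) // interval_minutes) * interval_minutes
--         periods.append((fmt(s), fmt(e), s, e))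
--         e = s
--     periods.reverse()
--     return periods
-- ===== Notes on version B (the rewrite author's own statement) =====
-- stated objective: alternative
-- what changed: B walks the day backwards from 1440 down to 0, computing each period's start by snapping end-1 to the previous interval multiple with floor division, appending and reversing at the end, instead of A's forward range loop with a clamp.
-- outside the precondition, e.g. on _build_time_periods(0): A raises ValueError, B returns []
import Mathlib
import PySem

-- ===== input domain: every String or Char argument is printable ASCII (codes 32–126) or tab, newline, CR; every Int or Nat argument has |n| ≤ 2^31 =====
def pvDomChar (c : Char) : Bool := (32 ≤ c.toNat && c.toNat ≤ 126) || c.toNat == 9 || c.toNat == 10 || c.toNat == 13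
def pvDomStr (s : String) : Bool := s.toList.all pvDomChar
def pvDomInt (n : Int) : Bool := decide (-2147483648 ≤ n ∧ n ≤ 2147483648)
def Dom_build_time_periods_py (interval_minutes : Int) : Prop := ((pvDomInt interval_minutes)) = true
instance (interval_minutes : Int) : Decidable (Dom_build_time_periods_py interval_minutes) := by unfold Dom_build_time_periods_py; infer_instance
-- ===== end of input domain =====

-- B partitions the day BACKWARDS: from 1440 it snaps each period start to the previous interval multiple by floor division, then reverses (alternative decomposition; same cost); B returns [] where A raises (interval 0), which Pre_ excludes.


-- f"{t // 60:02d}:{t % 60:02d}" — the formatting both Pythons share (exact for the ints that occur; :02d left-pads to width 2 with '0')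
def pvFmtHM (t : Int) : String :=
  let pad2 : Int → String := fun n =>
    let s := PySem.Int.toStr n
    if s.toList.length < 2 then "0" ++ s else s
  pad2 (PySem.Int.floordiv t 60) ++ ":" ++ pad2 (PySem.Int.mod t 60)

-- ===== PORT A =====
def build_time_periods_py (interval_minutes : Int) : List (String × String × Int × Int) :=
  (PySem.List.pyRange 0 1440 interval_minutes).foldl
    (fun periods m =>
      let end_m := m + interval_minutes
      let end_m := if end_m > 1440 then 1440 else end_m
      periods ++ [(pvFmtHM m, pvFmtHM end_m, m, end_m)])
    []

-- ===== PORT B =====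
-- Source B's while loop: append one period per step, end walking down from 1440; hk is termination bookkeeping only
def pvBackLoop (k : Int) (hk : 0 < k) (e : Int)
    (acc : List (String × String × Int × Int)) : List (String × String × Int × Int) :=
  if _he : e > 0 then
    let s := PySem.Int.floordiv (e - 1) k * k
    pvBackLoop k hk s (acc ++ [(pvFmtHM s, pvFmtHM e, s, e)])
  else acc
termination_by e.toNat
decreasing_by
  have h2 := Int.emod_nonneg (e - 1) (by omega : k ≠ 0)
  have h3 := Int.emod_lt_of_pos (e - 1) hk
  have h4 : PySem.Int.floordiv (e - 1) k * k = (e - 1) - (e - 1) % k := by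
    rw [PySem.Int.floordiv_eq_ediv_of_pos hk]
    linarith [Int.ediv_add_emod (e - 1) k, mul_comm k ((e - 1) / k)]
  omega

def build_time_periods_py_alt (interval_minutes : Int) : List (String × String × Int × Int) :=
  if h : interval_minutes ≤ 0 then []
  else (pvBackLoop interval_minutes (by omega) 1440 []).reverse

-- ===== PRECONDITION & SPEC =====
-- Pre_ excludes only interval_minutes = 0, where Python's range(0, 1440, 0) raises ValueError.
def Pre_build_time_periods_py (interval_minutes : Int) : Prop := interval_minutes ≠ 0
instance (interval_minutes : Int) : Decidable (Pre_build_time_periods_py interval_minutes) := by unfold Pre_build_time_periods_py; infer_instance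
def pvWitness_build_time_periods_py : Int := 60

def Spec_build_time_periods_py (interval_minutes : Int) (out : List (String × String × Int × Int)) : Prop := out = build_time_periods_py_alt interval_minutes
instance (interval_minutes : Int) (out : List (String × String × Int × Int)) : Decidable (Spec_build_time_periods_py interval_minutes out) := by unfold Spec_build_time_periods_py; infer_instance

-- ===== CLAIM (what is proved, stated in full; the proofs are below) =====
def Claim_equal_build_time_periods_py : Prop := ∀ (interval_minutes : Int), Dom_build_time_periods_py interval_minutes → Pre_build_time_periods_py interval_minutes → Spec_build_time_periods_py interval_minutes (build_time_periods_py interval_minutes)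
-- ===== LEMMAS AND PROOFS =====

-- the tuple A's loop body builds for start m
def pvF (k m : Int) : String × String × Int × Int :=
  (pvFmtHM m, pvFmtHM (if m + k > 1440 then 1440 else m + k), m, if m + k > 1440 then 1440 else m + k)

theorem pvFoldlPush {α β : Type} (f : α → β) :
    ∀ (l : List α) (init : List β),
      l.foldl (fun acc x => acc ++ [f x]) init = init ++ l.map f := by
  intro l
  induction l with
  | nil => simp
  | cons x xs ih => intro init; simp [List.foldl, ih]

theorem pvRange_pos_nil (a b s : Int) (hs : 0 < s) (h : b ≤ a) :
    PySem.List.pyRange a b s = [] := by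
  rw [PySem.List.pyRange_of_pos a b hs]
  simp [show ¬ a < b by omega]

theorem pvRange_pos_cons (a b s : Int) (hs : 0 < s) (h : a < b) :
    PySem.List.pyRange a b s = a :: PySem.List.pyRange (a + s) b s := by
  rw [PySem.List.pyRange_of_pos a b hs, PySem.List.pyRange_of_pos (a + s) b hs]
  by_cases h2 : a + s < b
  · have hcnt : (if a < b then ((b - a + s - 1) / s).toNat else 0)
        = (if a + s < b then ((b - (a + s) + s - 1) / s).toNat else 0) + 1 := by
      rw [if_pos h, if_pos h2]
      have e1 : b - a + s - 1 = (b - (a + s) + s - 1) + 1 * s := by ring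
      rw [e1, Int.add_mul_ediv_right _ _ (by omega : s ≠ 0)]
      have hnn : 0 ≤ (b - (a + s) + s - 1) / s :=
        Int.ediv_nonneg (by omega) (by omega)
      omega
    rw [hcnt, List.range_succ_eq_map]
    simp only [List.map_cons, List.map_map]
    congr 1
    · simp
    · apply List.map_congr_left
      intro k _
      simp only [Function.comp_apply]
      push_cast
      ring
  · have hcnt : (if a < b then ((b - a + s - 1) / s).toNat else 0) = 1 := by
      rw [if_pos h]
      have hlo : 1 ≤ (b - a + s - 1) / s := by
        rw [Int.le_ediv_iff_mul_le hs]; omega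
      have hhi : (b - a + s - 1) / s < 2 := by
        rw [Int.ediv_lt_iff_lt_mul hs]; omega
      omega
    rw [hcnt, if_neg h2]
    simp

theorem pvRange_neg_nil (s : Int) (hs : s < 0) : PySem.List.pyRange 0 1440 s = [] := by
  simp only [PySem.List.pyRange, if_neg (by omega : ¬ s = 0)]
  simp [show ¬ 0 < s by omega, show ¬ (1440 : Int) < 0 by omega]

-- split a positive-step range just before its last element s
theorem pvRange_split (k : Int) (hk : 0 < k) (a s e : Int) (hd : k ∣ (s - a))
    (has : a ≤ s) (hse : s < e) (hek : e ≤ s + k) :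
    PySem.List.pyRange a e k = PySem.List.pyRange a s k ++ [s] := by
  by_cases h : a = s
  · subst h
    rw [pvRange_pos_cons a e k hk (by omega), pvRange_pos_nil (a + k) e k hk (by omega),
        pvRange_pos_nil a a k hk le_rfl]
    simp
  · have hlt : a < s := lt_of_le_of_ne has h
    obtain ⟨t, ht⟩ := hd
    have ht1 : 1 ≤ t := by nlinarith
    have hks : a + k ≤ s := by nlinarith
    rw [pvRange_pos_cons a e k hk (by omega), pvRange_pos_cons a s k hk hlt,
        pvRange_split k hk (a + k) s e ⟨t - 1, by rw [mul_sub, mul_one]; omega⟩ (by omega) hse hek]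
    simp
termination_by (s - a).toNat
decreasing_by omega

-- the backward loop, on an interval-multiple endpoint e ≤ 1440, produces exactly the reversed forward table
theorem pvLoopEq (k : Int) (hk : 0 < k) (e : Int) (hd : k ∣ e) (h0 : 0 ≤ e) (h14 : e ≤ 1440)
    (acc : List (String × String × Int × Int)) :
    pvBackLoop k hk e acc = acc ++ ((PySem.List.pyRange 0 e k).map (pvF k)).reverse := by
  rw [pvBackLoop.eq_def]
  by_cases he : e > 0
  · rw [dif_pos he]
    obtain ⟨q, hq⟩ := hd
    have hq1 : 1 ≤ q := by nlinarith
    have hstep : PySem.Int.floordiv (e - 1) k * k = e - k := by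
      have : PySem.Int.floordiv (e - 1) k = q - 1 := by
        rw [PySem.Int.floordiv_eq_iff_of_pos hk]
        constructor <;> nlinarith
      rw [this]; linarith [hq]
    simp only [hstep]
    rw [pvLoopEq k hk (e - k) ⟨q - 1, by rw [mul_sub, mul_one]; omega⟩ (by nlinarith) (by omega)]
    rw [pvRange_split k hk 0 (e - k) e ⟨q - 1, by rw [mul_sub, mul_one]; omega⟩ (by nlinarith) (by omega) (by omega)]
    have hf : pvF k (e - k) = (pvFmtHM (e - k), pvFmtHM e, e - k, e) := by
      simp [pvF, show e - k + k = e by ring, show ¬ (1440 : Int) < e by omega]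
    simp [hf]
  · rw [dif_neg he]
    rw [pvRange_pos_nil 0 e k hk (by omega)]
    simp
termination_by e.toNat
decreasing_by omega

-- ===== VERDICT (by name: the statements are the Claim_ definitions above) =====
theorem build_time_periods_py_spec : Claim_equal_build_time_periods_py := by
  intro k _ hpre
  unfold Spec_build_time_periods_py build_time_periods_py build_time_periods_py_alt
  have hA : (PySem.List.pyRange 0 1440 k).foldl
      (fun periods m =>
        periods ++ [(pvFmtHM m, pvFmtHM (if m + k > 1440 then 1440 else m + k), m,
                     if m + k > 1440 then 1440 else m + k)]) []
      = (PySem.List.pyRange 0 1440 k).map (pvF k) := by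
    have h := pvFoldlPush (pvF k) (PySem.List.pyRange 0 1440 k) []
    simpa [pvF] using h
  have hk0 : k ≠ 0 := hpre
  by_cases hle : k ≤ 0
  · rw [dif_pos hle, pvRange_neg_nil k (by omega)]
    rfl
  · have hk : 0 < k := by omega
    rw [dif_neg hle]
    by_cases hdvd : k ∣ 1440
    · rw [pvLoopEq k hk 1440 hdvd (by norm_num) le_rfl]
      simp [hA]
    · rw [pvBackLoop.eq_def, dif_pos (by norm_num : (1440:Int) > 0)]
      have h2 := Int.emod_nonneg (1439 : Int) (by omega : k ≠ 0)
      have h3 := Int.emod_lt_of_pos (1439 : Int) hk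
      have hs : PySem.Int.floordiv ((1440 : Int) - 1) k * k = 1439 - 1439 % k := by
        rw [show ((1440:Int) - 1) = 1439 by norm_num, PySem.Int.floordiv_eq_ediv_of_pos hk]
        linarith [Int.ediv_add_emod (1439 : Int) k, mul_comm k ((1439 : Int) / k)]
      have hsd : k ∣ ((1439 : Int) - 1439 % k) :=
        ⟨1439 / k, by linarith [Int.ediv_add_emod (1439 : Int) k]⟩
      have h4 : (1439 : Int) % k ≤ 1439 := by
        nlinarith [Int.ediv_add_emod (1439 : Int) k, Int.ediv_nonneg (by norm_num : (0:Int) ≤ 1439) hk.le]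
      obtain ⟨r, hreq, hr0, hrk, hr9⟩ : ∃ r : Int, 1439 % k = r ∧ 0 ≤ r ∧ r < k ∧ r ≤ 1439 :=
        ⟨_, rfl, h2, h3, h4⟩
      rw [hreq] at hs hsd
      simp only [hs]
      have hne : (1439 : Int) - r + k ≠ 1440 := by
        intro hcon
        exact hdvd (by obtain ⟨c, hc⟩ := hsd; exact ⟨c + 1, by rw [mul_add, mul_one]; omega⟩)
      rw [pvLoopEq k hk (1439 - r) hsd (by omega) (by omega)]
      rw [hA, pvRange_split k hk 0 (1439 - r) 1440 (by simpa using hsd) (by omega)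
            (by omega) (by omega)]
      have hf : pvF k (1439 - r) = (pvFmtHM (1439 - r), pvFmtHM 1440, 1439 - r, 1440) := by
        simp [pvF, show (1439 : Int) - r + k > 1440 by omega]
      simp [hf]
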